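-- pv_equiv track=rewrite | github.com/zacheen/python | question_practice/leetcode/question_type/12_DP/_DP Best Decision/13_2430. Maximum Deletions on a String/A.py | deleteString
-- ===== SOURCE A (Python) =====
-- def deleteString(s: str) -> int:
--     n = len(s)
--     # lcs[i][j] := the number of the same letters of s[i..n) and s[j..n)
--     lcs = [[0] * (n + 1) for _ in range(n + 1)]
--     # dp[i] := the maximum number of operations needed to delete s[i..n)
--     dp = [1] * n
--
--     for i in range(n-1,-1,-1):
--         for j in range(i + 1, n):
--             if s[i] == s[j]:
--                 lcs[i][j] = lcs[i + 1][j + 1] + 1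
--                 if lcs[i][j] >= j - i:
--                     dp[i] = max(dp[i], dp[j] + 1)
--     return dp[0]
-- ===== SOURCE B (Python) =====
-- def deleteString(s: str) -> int:
--     # Drop the 2D lcs table: check block equality with direct slice comparison.
--     n = len(s)
--     dp = [1] * n
--     for i in range(n - 1, -1, -1):
--         for j in range(i + 1, n):
--             if s[i:j] == s[j:2 * j - i]:
--                 dp[i] = max(dp[i], dp[j] + 1)
--     return dp[0]
-- ===== Notes on version B (the rewrite author's own statement) =====
-- stated objective: simpler
-- what changed: Replaced the precomputed (n+1)x(n+1) suffix-LCP table and its conditional recurrence with a single dp pass that compares adjacent blocks directly via slicing (s[i:j] == s[j:2*j-i]).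
import Mathlib
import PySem

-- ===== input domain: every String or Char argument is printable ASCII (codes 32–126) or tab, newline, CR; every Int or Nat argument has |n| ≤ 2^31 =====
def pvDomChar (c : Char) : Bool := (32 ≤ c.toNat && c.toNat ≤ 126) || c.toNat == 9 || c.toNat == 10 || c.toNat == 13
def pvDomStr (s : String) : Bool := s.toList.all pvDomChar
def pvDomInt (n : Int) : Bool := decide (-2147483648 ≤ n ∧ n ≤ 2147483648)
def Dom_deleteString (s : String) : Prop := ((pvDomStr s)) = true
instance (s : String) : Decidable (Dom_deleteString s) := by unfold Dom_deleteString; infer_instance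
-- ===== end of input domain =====

-- B drops A's 2D suffix-LCP table and compares the two adjacent blocks directly by slicing
-- inside a single dp pass (objective: simpler; not faster).

-- ===== PORT A =====
-- the lcs table and dp array are encoded as point-updated functions (array cell assignment = pointwise update)
def stepA (cs : List Char) (i : Nat) (st : (Nat → Nat → Int) × (Nat → Int)) (j : Nat) :
    (Nat → Nat → Int) × (Nat → Int) :=
  if cs.getD i ' ' = cs.getD j ' ' then
    let v : Int := st.1 (i+1) (j+1) + 1
    let lcs' : Nat → Nat → Int := fun a b => if a = i ∧ b = j then v else st.1 a b
    if (j : Int) - (i : Int) ≤ v then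
      (lcs', fun a => if a = i then max (st.2 i) (st.2 j + 1) else st.2 a)
    else (lcs', st.2)
  else st

def rowA (cs : List Char) (n i : Nat) (st : (Nat → Nat → Int) × (Nat → Int)) :
    (Nat → Nat → Int) × (Nat → Int) :=
  (List.range' (i+1) (n - (i+1))).foldl (stepA cs i) st

-- for i in range(n-1, -1, -1): outerA … k processes rows k-1, k-2, …, 0
def outerA (cs : List Char) (n : Nat) :
    Nat → ((Nat → Nat → Int) × (Nat → Int)) → ((Nat → Nat → Int) × (Nat → Int))
  | 0, st => st
  | k+1, st => outerA cs n k (rowA cs n k st)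

def deleteString (s : String) : Int :=
  let cs := s.toList
  let n := cs.length
  (outerA cs n n (fun _ _ => 0, fun _ => 1)).2 0

-- ===== PORT B =====
def stepB (cs : List Char) (i : Nat) (dp : Nat → Int) (j : Nat) : Nat → Int :=
  if PySem.List.slice cs (some (i : Int)) (some (j : Int)) =
     PySem.List.slice cs (some (j : Int)) (some (2 * (j : Int) - (i : Int))) then
    fun a => if a = i then max (dp i) (dp j + 1) else dp a
  else dp

def rowB (cs : List Char) (n i : Nat) (dp : Nat → Int) : Nat → Int :=
  (List.range' (i+1) (n - (i+1))).foldl (stepB cs i) dp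

def outerB (cs : List Char) (n : Nat) : Nat → (Nat → Int) → (Nat → Int)
  | 0, dp => dp
  | k+1, dp => outerB cs n k (rowB cs n k dp)

def deleteString_alt (s : String) : Int :=
  let cs := s.toList
  let n := cs.length
  (outerB cs n n (fun _ => 1)) 0

-- ===== PRECONDITION & SPEC =====
-- Pre_ excludes only the empty string, on which the Python A (and B) raises IndexError at dp[0].
def Pre_deleteString (s : String) : Prop := s ≠ ""
instance (s : String) : Decidable (Pre_deleteString s) := by unfold Pre_deleteString; infer_instance
def pvWitness_deleteString : String := "aba"

def Spec_deleteString (s : String) (out : Int) : Prop := out = deleteString_alt s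
instance (s : String) (out : Int) : Decidable (Spec_deleteString s out) := by unfold Spec_deleteString; infer_instance

-- ===== CLAIM (what is proved, stated in full; the proofs are below) =====
def Claim_equal_deleteString : Prop := ∀ (s : String), Dom_deleteString s → Pre_deleteString s → Spec_deleteString s (deleteString s)

-- ===== LEMMAS AND PROOFS =====

-- longest common prefix length of two suffix lists (the value A's lcs table holds)
def pvLcp : List Char → List Char → Nat
  | a :: as, b :: bs => if a = b then pvLcp as bs + 1 else 0
  | _, _ => 0

theorem pvLcp_nil_left (ys : List Char) : pvLcp [] ys = 0 := by cases ys <;> rfl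

theorem pvLcp_nil_right (xs : List Char) : pvLcp xs [] = 0 := by cases xs <;> rfl

theorem pvLcp_ge_iff (k : Nat) (xs ys : List Char) :
    k ≤ pvLcp xs ys ↔ (xs.take k = ys.take k ∧ k ≤ xs.length ∧ k ≤ ys.length) := by
  induction k generalizing xs ys with
  | zero => simp
  | succ k ih =>
    cases xs with
    | nil => simp [pvLcp_nil_left]
    | cons a as =>
      cases ys with
      | nil => simp [pvLcp_nil_right]
      | cons b bs =>
        by_cases hab : a = b
        · subst hab
          simp [pvLcp, List.take_succ_cons, ih]
        · simp [pvLcp, hab, List.take_succ_cons]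

theorem slice_eq_iff_lcp (cs : List Char) (i j : Nat) (hij : i < j) (hjn : j ≤ cs.length) :
    ((cs.drop i).take (j - i) = (cs.drop j).take (j - i)) ↔ (j - i ≤ pvLcp (cs.drop i) (cs.drop j)) := by
  rw [pvLcp_ge_iff]
  constructor
  · intro h
    refine ⟨h, by rw [List.length_drop]; omega, ?_⟩
    have hlen := congrArg List.length h
    rw [List.length_take, List.length_take, List.length_drop, List.length_drop] at hlen
    rw [List.length_drop]
    omega
  · rintro ⟨h, _, _⟩; exact h

-- B's slice condition ↔ A's (char test, lcs recurrence) condition, read through pvLcp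
theorem cond_match (cs : List Char) (i j : Nat) (hij : i < j) (hjn : j < cs.length) :
    (PySem.List.slice cs (some (i : Int)) (some (j : Int)) =
       PySem.List.slice cs (some (j : Int)) (some (2 * (j : Int) - (i : Int))))
    ↔ (cs.getD i ' ' = cs.getD j ' ' ∧
        ((j : Int) - (i : Int) ≤ (pvLcp (cs.drop (i+1)) (cs.drop (j+1)) : Int) + 1)) := by
  have hi : i < cs.length := lt_trans hij hjn
  have h2j : (2 * (j : Int) - (i : Int)) = ((j + (j - i) : Nat) : Int) := by omega
  rw [h2j, PySem.List.slice_natCast, PySem.List.slice_natCast]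
  have hjj : j + (j - i) - j = j - i := by omega
  rw [hjj, slice_eq_iff_lcp cs i j hij (le_of_lt hjn)]
  have hdi : cs.drop i = cs[i] :: cs.drop (i+1) := List.drop_eq_getElem_cons hi
  have hdj : cs.drop j = cs[j] :: cs.drop (j+1) := List.drop_eq_getElem_cons hjn
  rw [hdi, hdj, List.getD_eq_getElem cs ' ' hi, List.getD_eq_getElem cs ' ' hjn]
  by_cases hab : cs[i] = cs[j]
  · rw [hab]
    have hstep : pvLcp (cs[j] :: cs.drop (i+1)) (cs[j] :: cs.drop (j+1))
        = pvLcp (cs.drop (i+1)) (cs.drop (j+1)) + 1 := by simp [pvLcp]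
    rw [hstep]
    constructor
    · intro h; exact ⟨rfl, by omega⟩
    · rintro ⟨-, h⟩; omega
  · have hstep : pvLcp (cs[i] :: cs.drop (i+1)) (cs[j] :: cs.drop (j+1)) = 0 := by
      simp [pvLcp, hab]
    rw [hstep]
    constructor
    · intro h; omega
    · rintro ⟨h, -⟩; exact absurd h hab

theorem row_inv (cs : List Char) (i : Nat) (m : Nat) :
    ∀ (j : Nat) (lcs : Nat → Nat → Int) (dp : Nat → Int),
      i < j → j + m = cs.length →
      (∀ a b, i < a → a < b → lcs a b = (pvLcp (cs.drop a) (cs.drop b) : Int)) →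
      (∀ b, i < b → b < j → lcs i b = (pvLcp (cs.drop i) (cs.drop b) : Int)) →
      (∀ b, j ≤ b → lcs i b = 0) →
      (∀ a b, a < i → lcs a b = 0) →
      (((List.range' j m).foldl (stepA cs i) (lcs, dp)).2 =
          (List.range' j m).foldl (stepB cs i) dp ∧
       (∀ a b, i ≤ a → a < b → ((List.range' j m).foldl (stepA cs i) (lcs, dp)).1 a b
            = (pvLcp (cs.drop a) (cs.drop b) : Int)) ∧
       (∀ a b, a < i → ((List.range' j m).foldl (stepA cs i) (lcs, dp)).1 a b = 0)) := by
  induction m with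
  | zero =>
    intro j lcs dp hij hjm h1 h2 h0 h3
    simp only [List.range'_zero, List.foldl_nil]
    refine ⟨trivial, ?_, h3⟩
    intro a b ha hab
    rcases Nat.lt_or_ge i a with h | h
    · exact h1 a b h hab
    · have hai : a = i := le_antisymm (by omega) ha
      subst hai
      rcases Nat.lt_or_ge b j with hb | hb
      · exact h2 b hab hb
      · rw [h0 b hb]
        have : cs.drop b = [] := List.drop_eq_nil_of_le (by omega)
        rw [this, pvLcp_nil_right]
        rfl
  | succ m ih =>
    intro j lcs dp hij hjm h1 h2 h0 h3
    rw [List.range'_succ]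
    simp only [List.foldl_cons]
    have hjn : j < cs.length := by omega
    have hLread : lcs (i+1) (j+1) = (pvLcp (cs.drop (i+1)) (cs.drop (j+1)) : Int) :=
      h1 (i+1) (j+1) (by omega) (by omega)
    by_cases hc : cs.getD i ' ' = cs.getD j ' '
    · -- chars equal: A writes lcs[i][j]; dp branches coincide by cond_match
      have hcm := cond_match cs i j hij hjn
      have hdi : cs.drop i = cs[i] :: cs.drop (i+1) := List.drop_eq_getElem_cons (lt_trans hij hjn)
      have hdj : cs.drop j = cs[j] :: cs.drop (j+1) := List.drop_eq_getElem_cons hjn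
      have hab : cs[i] = cs[j] := by
        rw [List.getD_eq_getElem cs ' ' (lt_trans hij hjn), List.getD_eq_getElem cs ' ' hjn] at hc
        exact hc
      have hlcpij : (pvLcp (cs.drop i) (cs.drop j) : Int)
          = (pvLcp (cs.drop (i+1)) (cs.drop (j+1)) : Int) + 1 := by
        rw [hdi, hdj, hab]
        simp [pvLcp]
      set L : Int := (pvLcp (cs.drop (i+1)) (cs.drop (j+1)) : Int) with hL
      set lcs' : Nat → Nat → Int :=
        fun a b => if a = i ∧ b = j then lcs (i+1) (j+1) + 1 else lcs a b with hlcs'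
      have hinv1 : ∀ a b, i < a → a < b → lcs' a b = (pvLcp (cs.drop a) (cs.drop b) : Int) := by
        intro a b ha hb
        simp only [hlcs']
        rw [if_neg (by omega)]
        exact h1 a b ha hb
      have hinv2 : ∀ b, i < b → b < j + 1 → lcs' i b = (pvLcp (cs.drop i) (cs.drop b) : Int) := by
        intro b hbi hbj
        simp only [hlcs']
        rcases Nat.lt_or_ge b j with hb | hb
        · rw [if_neg (by omega)]; exact h2 b hbi hb
        · have hbj : b = j := by omega
          rw [hbj, if_pos (⟨trivial, rfl⟩ : True ∧ j = j), hLread, hlcpij]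
      have hinv0 : ∀ b, j + 1 ≤ b → lcs' i b = 0 := by
        intro b hb
        simp only [hlcs']
        rw [if_neg (by omega)]
        exact h0 b (by omega)
      have hinv3 : ∀ a b, a < i → lcs' a b = 0 := by
        intro a b ha
        simp only [hlcs']
        rw [if_neg (by omega)]
        exact h3 a b ha
      by_cases hd : (j : Int) - (i : Int) ≤ lcs (i+1) (j+1) + 1
      · -- dp update fires in both
        have hB : PySem.List.slice cs (some (i : Int)) (some (j : Int)) =
            PySem.List.slice cs (some (j : Int)) (some (2 * (j : Int) - (i : Int))) := by
          rw [hcm]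
          exact ⟨hc, by rw [hLread] at hd; exact hd⟩
        rw [stepA, if_pos hc, stepB, if_pos hB]
        simp only [if_pos hd]
        exact ih (j+1) lcs' _ (by omega) (by omega) hinv1 hinv2 hinv0 hinv3
      · have hB : ¬ (PySem.List.slice cs (some (i : Int)) (some (j : Int)) =
            PySem.List.slice cs (some (j : Int)) (some (2 * (j : Int) - (i : Int)))) := by
          rw [hcm]
          rintro ⟨_, hle⟩
          rw [hLread] at hd
          exact hd hle
        rw [stepA, if_pos hc, stepB, if_neg hB]
        simp only [if_neg hd]
        exact ih (j+1) lcs' _ (by omega) (by omega) hinv1 hinv2 hinv0 hinv3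
    · -- chars differ: A does nothing; B's slice test is false too
      have hB : ¬ (PySem.List.slice cs (some (i : Int)) (some (j : Int)) =
          PySem.List.slice cs (some (j : Int)) (some (2 * (j : Int) - (i : Int)))) := by
        rw [cond_match cs i j hij hjn]
        rintro ⟨hch, _⟩
        exact hc hch
      rw [stepA, if_neg hc, stepB, if_neg hB]
      have hdi : cs.drop i = cs[i] :: cs.drop (i+1) := List.drop_eq_getElem_cons (lt_trans hij hjn)
      have hdj : cs.drop j = cs[j] :: cs.drop (j+1) := List.drop_eq_getElem_cons hjn
      have hab : cs[i] ≠ cs[j] := by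
        rw [List.getD_eq_getElem cs ' ' (lt_trans hij hjn), List.getD_eq_getElem cs ' ' hjn] at hc
        exact hc
      have hinv2 : ∀ b, i < b → b < j + 1 → lcs i b = (pvLcp (cs.drop i) (cs.drop b) : Int) := by
        intro b hbi hbj
        rcases Nat.lt_or_ge b j with hb | hb
        · exact h2 b hbi hb
        · have hbj : b = j := by omega
          rw [hbj, h0 j (le_refl j), hdi, hdj]
          simp [pvLcp, hab]
      exact ih (j+1) lcs dp (by omega) (by omega) h1 hinv2 (fun b hb => h0 b (by omega)) h3
  
theorem outer_inv (cs : List Char) : ∀ (k : Nat) (lcs : Nat → Nat → Int) (dp : Nat → Int),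
    k ≤ cs.length →
    (∀ a b, k ≤ a → a < b → lcs a b = (pvLcp (cs.drop a) (cs.drop b) : Int)) →
    (∀ a b, a < k → lcs a b = 0) →
    (outerA cs cs.length k (lcs, dp)).2 = outerB cs cs.length k dp := by
  intro k
  induction k with
  | zero => intro lcs dp _ _ _; rfl
  | succ k ih =>
    intro lcs dp hk h1 h3
    rw [outerA, outerB]
    have hrow := row_inv cs k (cs.length - (k+1)) (k+1) lcs dp (by omega) (by omega)
      (fun a b ha hb => h1 a b (by omega) hb)
      (fun b hb1 hb2 => absurd hb2 (by omega))
      (fun b hb => h3 k b (by omega))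
      (fun a b ha => h3 a b (by omega))
    obtain ⟨hdp, hh1, hh3⟩ := hrow
    have : rowA cs cs.length k (lcs, dp)
        = ((List.range' (k+1) (cs.length - (k+1))).foldl (stepA cs k) (lcs, dp)) := rfl
    rw [this]
    rw [← Prod.mk.eta (p := (List.range' (k+1) (cs.length - (k+1))).foldl (stepA cs k) (lcs, dp))]
    rw [ih _ _ (by omega) hh1 hh3, hdp]
    rfl

-- ===== VERDICT (by name: the statement is the Claim_ definition above) =====
theorem deleteString_spec : Claim_equal_deleteString := by
  intro s _ _
  unfold Spec_deleteString deleteString deleteString_alt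
  have hinit : ∀ a b, s.toList.length ≤ a → a < b →
      (0 : Int) = (pvLcp (s.toList.drop a) (s.toList.drop b) : Int) := by
    intro a b ha hb
    have h1 : s.toList.drop a = [] := List.drop_eq_nil_of_le ha
    have h2 : s.toList.drop b = [] := List.drop_eq_nil_of_le (by omega)
    rw [h1, h2]
    rfl
  have h := outer_inv s.toList s.toList.length (fun _ _ => 0) (fun _ => 1) (le_refl _)
    hinit (fun _ _ _ => rfl)
  show (outerA s.toList s.toList.length s.toList.length (fun _ _ => 0, fun _ => 1)).2 0
      = outerB s.toList s.toList.length s.toList.length (fun _ => 1) 0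
  rw [h]
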